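-- pv_equiv track=rewrite | github.com/anishLearnsToCode/hackerrank-interview-preparation-kit | python/dictionary/sherlock_and_anagrams.py | get_substrings_freq
-- ===== SOURCE A (Python) =====
-- def get_substrings_freq(s: str) -> dict:
--     distribution = {}
--     for i in range(len(s)):
--         frequency = {}
--         for j in range(i, len(s)):
--             character = s[j]
--             frequency[character] = frequency.get(character, 0) + 1
--             freq_repr = tuple(sorted(list(frequency.items()), key=lambda x: x[0]))
--             distribution[freq_repr] = distribution.get(freq_repr, 0) + 1
--     return distribution
-- ===== SOURCE B (Python) =====
-- def _bump(key, c):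
--     """Return the sorted (char, count) tuple `key` with c's count incremented,
--     inserting (c, 1) at its sorted position when c is absent."""
--     if not key:
--         return ((c, 1),)
--     (d, m), rest = key[0], key[1:]
--     if d == c:
--         return ((c, m + 1),) + rest
--     if d > c:
--         return ((c, 1),) + key
--     return ((d, m),) + _bump(rest, c)
--
--
-- def get_substrings_freq(s: str) -> dict:
--     distribution = {}
--     for i in range(len(s)):
--         key = ()
--         for j in range(i, len(s)):
--             key = _bump(key, s[j])
--             distribution[key] = distribution.get(key, 0) + 1
--     return distribution
-- ===== Notes on version B (the rewrite author's own statement) =====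
-- stated objective: alternative
-- what changed: B maintains each substring's canonical signature directly as a sorted (char,count) tuple updated by one ordered insertion per new character, eliminating A's per-step frequency dict and its items-list re-sort.
import Mathlib
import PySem

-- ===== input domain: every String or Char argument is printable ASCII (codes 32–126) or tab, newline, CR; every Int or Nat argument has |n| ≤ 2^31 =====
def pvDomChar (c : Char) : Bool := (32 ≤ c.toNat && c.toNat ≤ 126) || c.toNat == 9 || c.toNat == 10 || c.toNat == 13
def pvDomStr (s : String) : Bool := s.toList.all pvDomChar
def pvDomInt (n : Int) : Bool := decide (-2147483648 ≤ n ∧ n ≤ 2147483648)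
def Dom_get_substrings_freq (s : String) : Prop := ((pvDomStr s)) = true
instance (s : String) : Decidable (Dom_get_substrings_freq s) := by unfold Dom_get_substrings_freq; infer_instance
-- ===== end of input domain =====

-- B replaces A's per-step frequency dict + re-sort of its items by a sorted (char,count)
-- list maintained with one ordered insertion per character (objective: alternative).

-- ===== PORT A =====
def get_substrings_freq (s : String) : List (List (String × Int) × Int) :=
  ((PySem.List.pyRange 0 (PySem.List.len s.toList) 1).foldl (fun distribution i =>
    ((PySem.List.pyRange i (PySem.List.len s.toList) 1).foldl
      (fun (st : PySem.Dict String Int × PySem.Dict (List (String × Int)) Int) j =>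
        let character : String := String.ofList [PySem.List.pyGetD s.toList j ' ']
        let frequency := st.1.insert character (st.1.getD character 0 + 1)
        let freq_repr := PySem.List.sorted frequency.items (fun x => x.1)
        (frequency, st.2.insert freq_repr (st.2.getD freq_repr 0 + 1)))
      (PySem.Dict.empty, distribution)).2)
    (PySem.Dict.empty : PySem.Dict (List (String × Int)) Int)).items

-- ===== PORT B =====
-- _bump: insert/increment character c in the sorted (char, count) list
def bumpKey (key : List (String × Int)) (c : String) : List (String × Int) :=
  match key with
  | [] => [(c, 1)]
  | (d, m) :: rest =>
    if d = c then (c, m + 1) :: rest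
    else if c < d then (c, 1) :: (d, m) :: rest
    else (d, m) :: bumpKey rest c

def get_substrings_freq_alt (s : String) : List (List (String × Int) × Int) :=
  ((PySem.List.pyRange 0 (PySem.List.len s.toList) 1).foldl (fun distribution i =>
    ((PySem.List.pyRange i (PySem.List.len s.toList) 1).foldl
      (fun (st : List (String × Int) × PySem.Dict (List (String × Int)) Int) j =>
        let key := bumpKey st.1 (String.ofList [PySem.List.pyGetD s.toList j ' '])
        (key, st.2.insert key (st.2.getD key 0 + 1)))
      (([] : List (String × Int)), distribution)).2)
    (PySem.Dict.empty : PySem.Dict (List (String × Int)) Int)).items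

-- ===== PRECONDITION & SPEC =====
def Spec_get_substrings_freq (s : String) (out : List (List (String × Int) × Int)) : Prop := out = get_substrings_freq_alt s
instance (s : String) (out : List (List (String × Int) × Int)) : Decidable (Spec_get_substrings_freq s out) := by unfold Spec_get_substrings_freq; infer_instance

-- ===== CLAIM (what is proved, stated in full; the proofs are below) =====
def Claim_equal_get_substrings_freq : Prop := ∀ (s : String), Dom_get_substrings_freq s → Spec_get_substrings_freq s (get_substrings_freq s)

-- ===== LEMMAS AND PROOFS =====

theorem mem_bumpKey {k : List (String × Int)} {c : String} {x : String × Int}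
    (hx : x ∈ bumpKey k c) : x.1 = c ∨ x ∈ k := by
  induction k with
  | nil =>
    simp [bumpKey] at hx
    subst hx; exact Or.inl rfl
  | cons p rest ih =>
    obtain ⟨d, m⟩ := p
    by_cases hdc : d = c
    · simp [bumpKey, hdc] at hx
      rcases hx with h | h
      · subst h; exact Or.inl rfl
      · exact Or.inr (List.mem_cons_of_mem _ h)
    · by_cases hcd : c < d
      · simp [bumpKey, hdc, hcd] at hx
        rcases hx with h | h | h
        · subst h; exact Or.inl rfl
        · exact Or.inr (by simp [h])
        · exact Or.inr (List.mem_cons_of_mem _ h)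
      · simp [bumpKey, hdc, hcd] at hx
        rcases hx with h | h
        · exact Or.inr (by simp [h])
        · rcases ih h with h' | h'
          · exact Or.inl h'
          · exact Or.inr (List.mem_cons_of_mem _ h')

theorem pairwise_bumpKey {k : List (String × Int)} (c : String)
    (h : k.Pairwise (fun a b => a.1 < b.1)) :
    (bumpKey k c).Pairwise (fun a b => a.1 < b.1) := by
  induction k with
  | nil => simp [bumpKey]
  | cons p rest ih =>
    obtain ⟨d, m⟩ := p
    rw [List.pairwise_cons] at h
    by_cases hdc : d = c
    · simp only [bumpKey, if_pos hdc]
      rw [List.pairwise_cons]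
      exact ⟨fun b hb => hdc ▸ h.1 b hb, h.2⟩
    · by_cases hcd : c < d
      · simp only [bumpKey, if_neg hdc, if_pos hcd]
        rw [List.pairwise_cons]
        refine ⟨?_, by rw [List.pairwise_cons]; exact h⟩
        intro b hb
        rcases List.mem_cons.mp hb with h' | h'
        · subst h'; exact hcd
        · exact lt_trans hcd (h.1 b h')
      · simp only [bumpKey, if_neg hdc, if_neg hcd]
        rw [List.pairwise_cons]
        refine ⟨?_, ih h.2⟩
        intro b hb
        rcases mem_bumpKey hb with h' | h'
        · rw [h']; exact lt_of_le_of_ne (not_lt.mp hcd) hdc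
        · exact h.1 b h'

theorem bumpKey_of_mem {k : List (String × Int)} {c : String}
    (hs : k.Pairwise (fun a b => a.1 < b.1)) (hm : c ∈ k.map (fun p => p.1)) :
    bumpKey k c = k.map (fun p => if p.1 = c then (c, p.2 + 1) else p) := by
  induction k with
  | nil => simp at hm
  | cons p rest ih =>
    obtain ⟨d, m⟩ := p
    rw [List.pairwise_cons] at hs
    by_cases hdc : d = c
    · simp only [bumpKey, if_pos hdc, List.map_cons]
      have hrest : rest.map (fun p => if p.1 = c then (c, p.2 + 1) else p) = rest := by
        refine (List.map_congr_left ?_).trans (List.map_id _)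
        intro p hp
        have : d < p.1 := hs.1 p hp
        have : p.1 ≠ c := by rw [← hdc]; exact (ne_of_lt this).symm
        simp [this]
      rw [hrest]
    · have hm' : c ∈ rest.map (fun p => p.1) := by
        rcases List.mem_cons.mp hm with h | h
        · exact absurd h.symm (by simpa using hdc)
        · exact h
      by_cases hcd : c < d
      · exfalso
        obtain ⟨p, hp, hpc⟩ := List.mem_map.mp hm'
        have := hs.1 p hp
        rw [hpc] at this
        exact absurd (lt_trans hcd this) (lt_irrefl c)
      · simp only [bumpKey, if_neg hdc, if_neg hcd, List.map_cons]
        rw [ih hs.2 hm']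

theorem bumpKey_perm_of_not_mem {k : List (String × Int)} {c : String}
    (hm : c ∉ k.map (fun p => p.1)) : (bumpKey k c).Perm (k ++ [(c, 1)]) := by
  induction k with
  | nil => simp [bumpKey]
  | cons p rest ih =>
    obtain ⟨d, m⟩ := p
    have hdc : d ≠ c := by
      intro h; exact hm (by simp [h])
    have hm' : c ∉ rest.map (fun p => p.1) := by
      intro h; exact hm (by simp [h])
    by_cases hcd : c < d
    · simp only [bumpKey, if_neg hdc, if_pos hcd]
      exact (List.perm_append_singleton _ _).symm
    · simp only [bumpKey, if_neg hdc, if_neg hcd, List.cons_append]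
      exact (ih hm').cons _

-- the core step: sorting the items of the updated frequency dict IS bumpKey of the previous sorted items
theorem step_sorted (d : PySem.Dict String Int) (c : String) (h : d.keys.Nodup) :
    PySem.List.sorted (d.insert c (d.getD c 0 + 1)).items (fun x => x.1)
      = bumpKey (PySem.List.sorted d.items (fun x => x.1)) c := by
  have hperm : (PySem.List.sorted d.items (fun x => x.1)).Perm d.items :=
    PySem.List.sorted_perm d.items (fun x => x.1) false
  have hkeys : d.keys = d.items.map (fun p => p.1) := rfl
  have hnodup_map : ((PySem.List.sorted d.items (fun x => x.1)).map (fun p => p.1)).Nodup :=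
    ((hperm.map (fun p => p.1)).nodup_iff).mpr (hkeys ▸ h)
  have hmaplt : ((PySem.List.sorted d.items (fun x => x.1)).map (fun p => p.1)).Pairwise (· < ·) :=
    ((PySem.List.sorted_map_key_pairwise d.items (fun x => x.1)).and hnodup_map).imp
      (fun hab => lt_of_le_of_ne hab.1 hab.2)
  have hlt : (PySem.List.sorted d.items (fun x => x.1)).Pairwise (fun a b => a.1 < b.1) :=
    List.pairwise_map.mp hmaplt
  by_cases hc : d.contains c = true
  · rw [PySem.Dict.items_insert_of_contains d _ hc]
    have hmemkeys : c ∈ d.keys := by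
      rw [PySem.Dict.contains_eq_decide_mem_keys] at hc
      exact of_decide_eq_true hc
    have hm : c ∈ (PySem.List.sorted d.items (fun x => x.1)).map (fun p => p.1) :=
      ((hperm.map (fun p => p.1)).mem_iff).mpr (hkeys ▸ hmemkeys)
    refine (PySem.List.sorted_eq_of_perm_of_pairwise_lt _ _ _ ?_ (pairwise_bumpKey c hlt))
    rw [bumpKey_of_mem hlt hm]
    have hcongr : (PySem.List.sorted d.items (fun x => x.1)).map (fun p => if p.1 = c then (c, p.2 + 1) else p)
        = (PySem.List.sorted d.items (fun x => x.1)).map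
            (fun p => if (p.1 == c) = true then (c, d.getD c 0 + 1) else p) := by
      refine List.map_congr_left ?_
      intro p hp
      by_cases hpc : p.1 = c
      · have hpitems : (p.1, p.2) ∈ d.items := by
          have : p ∈ d.items := hperm.mem_iff.mp hp
          simpa using this
        have hval : d.getD p.1 0 = p.2 := PySem.Dict.getD_of_mem_items d hpitems h 0
        rw [← hpc]
        simp [hpc, ← hval]
      · simp [hpc]
    rw [hcongr]
    exact hperm.map _
  · rw [PySem.Dict.items_insert_of_not_contains d _ (by simpa using hc),
        PySem.Dict.getD_of_not_contains d 0 (by simpa using hc)]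
    have hm : c ∉ (PySem.List.sorted d.items (fun x => x.1)).map (fun p => p.1) := by
      intro hmem
      apply hc
      rw [PySem.Dict.contains_eq_decide_mem_keys]
      refine decide_eq_true ?_
      rw [hkeys]
      exact (hperm.map (fun p => p.1)).mem_iff.mp hmem
    refine (PySem.List.sorted_eq_of_perm_of_pairwise_lt _ _ _ ?_ (pairwise_bumpKey c hlt))
    have h1 : (bumpKey (PySem.List.sorted d.items (fun x => x.1)) c).Perm
        ((PySem.List.sorted d.items (fun x => x.1)) ++ [(c, 1)]) := bumpKey_perm_of_not_mem hm
    have h2 : ((PySem.List.sorted d.items (fun x => x.1)) ++ [(c, 1)]).Perm (d.items ++ [(c, 0 + 1)]) := by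
      norm_num
      exact hperm.append_right _
    exact h1.trans h2

-- the inner loops agree, given the invariant "B's key = sorted items of A's frequency dict"
theorem inner_eq (cs : List Char) (n : Int) (fuel : Nat) :
    ∀ (j : Int), n - j ≤ (fuel : Int) →
    ∀ (d : PySem.Dict String Int) (k : List (String × Int))
      (dist : PySem.Dict (List (String × Int)) Int),
      d.keys.Nodup → PySem.List.sorted d.items (fun x => x.1) = k →
      ((PySem.List.pyRange j n 1).foldl
        (fun (st : PySem.Dict String Int × PySem.Dict (List (String × Int)) Int) j =>
          let character : String := String.ofList [PySem.List.pyGetD cs j ' ']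
          let frequency := st.1.insert character (st.1.getD character 0 + 1)
          let freq_repr := PySem.List.sorted frequency.items (fun x => x.1)
          (frequency, st.2.insert freq_repr (st.2.getD freq_repr 0 + 1))) (d, dist)).2
      = ((PySem.List.pyRange j n 1).foldl
          (fun (st : List (String × Int) × PySem.Dict (List (String × Int)) Int) j =>
            let key := bumpKey st.1 (String.ofList [PySem.List.pyGetD cs j ' '])
            (key, st.2.insert key (st.2.getD key 0 + 1))) (k, dist)).2 := by
  induction fuel with
  | zero =>
    intro j hj d k dist _ _
    rw [PySem.List.pyRange_one_eq_nil (by omega)]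
    rfl
  | succ f ih =>
    intro j hj d k dist hnd hk
    by_cases hjn : j < n
    · rw [PySem.List.pyRange_one_cons hjn]
      simp only [List.foldl_cons]
      have hstep : PySem.List.sorted
          (d.insert (String.ofList [PySem.List.pyGetD cs j ' '])
            (d.getD (String.ofList [PySem.List.pyGetD cs j ' ']) 0 + 1)).items (fun x => x.1)
          = bumpKey k (String.ofList [PySem.List.pyGetD cs j ' ']) := by
        rw [← hk]
        exact step_sorted d _ hnd
      rw [hstep]
      exact ih (j + 1) (by omega) _ _ _
        (PySem.Dict.nodup_keys_insert d _ _ hnd) hstep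
    · rw [PySem.List.pyRange_one_eq_nil (by omega)]
      rfl

-- ===== VERDICT (by name: the statement is the Claim_ definition above) =====
theorem get_substrings_freq_spec : Claim_equal_get_substrings_freq := by
  intro s _
  unfold Spec_get_substrings_freq get_substrings_freq get_substrings_freq_alt
  refine congrArg PySem.Dict.items ?_
  refine PySem.List.foldl_congr_mem _ _ _ _ ?_
  intro acc i _
  exact inner_eq s.toList (PySem.List.len s.toList)
      ((PySem.List.len s.toList - i).toNat) i (Int.self_le_toNat _)
      PySem.Dict.empty [] acc (by simp) rfl
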